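-- pv_equiv track=rewrite | github.com/DicodeGier/python-codes | CAE/CAE_5&7d.py | sameElements
-- ===== SOURCE A (Python) =====
-- def sameElements(a,b):
--     for i in range(0,len(a)):
--         if a[i] in b:
--             b.pop(b.index(a[i]))
--     if b == []:
--         return("lists are identical")
--     else:
--         return("lists are NOT identical")
-- ===== SOURCE B (Python) =====
-- def sameElements(a, b):
--     cnt = {}
--     for x in a:
--         cnt[x] = cnt.get(x, 0) + 1
--     kept = []
--     for x in b:
--         if cnt.get(x, 0) > 0:
--             cnt[x] -= 1
--         else:
--             kept.append(x)
--     b[:] = kept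
--     return "lists are identical" if not kept else "lists are NOT identical"
-- ===== Notes on version B (the rewrite author's own statement) =====
-- stated objective: faster
-- what changed: Replaces A's per-element membership test + index search + pop over b for every element of a with a counting dict built once over a and a single pass over b that keeps only the unmatched elements (b[:] = kept preserves the in-place mutation, which ends in the same list).
import Mathlib
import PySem

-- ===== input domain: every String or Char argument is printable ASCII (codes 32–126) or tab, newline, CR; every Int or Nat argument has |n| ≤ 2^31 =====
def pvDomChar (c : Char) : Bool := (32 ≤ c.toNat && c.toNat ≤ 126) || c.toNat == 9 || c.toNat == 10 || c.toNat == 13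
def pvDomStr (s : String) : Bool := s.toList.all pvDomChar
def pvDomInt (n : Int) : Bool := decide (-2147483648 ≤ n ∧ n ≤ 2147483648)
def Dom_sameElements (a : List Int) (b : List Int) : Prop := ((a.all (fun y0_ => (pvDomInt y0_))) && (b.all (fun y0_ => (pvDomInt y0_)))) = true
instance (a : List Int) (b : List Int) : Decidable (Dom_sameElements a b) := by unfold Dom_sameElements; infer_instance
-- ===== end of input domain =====

-- ===== PORT A =====
-- B changes: counting pass over a + one pass over b instead of a per-element rescan of b (faster).
-- Both Pythons mutate b in place and leave it equal afterwards; the equivalence proved here is about the return value.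
-- 'b.pop(b.index(a[i]))': index? gives the first index, pop? removes it.
def sameElements (a : List Int) (b : List Int) : String :=
  let bF := a.foldl (fun cur x =>
    if x ∈ cur then
      match PySem.List.index? cur x with
      | some i =>
        match PySem.List.pop? cur (i : Int) with
        | some (_, rest) => rest
        | none => cur
      | none => cur
    else cur) b
  if bF = [] then "lists are identical" else "lists are NOT identical"

-- ===== PORT B =====
-- 'cnt[x] = cnt.get(x,0)+1' = insert x (getD x 0 + 1); 'cnt[x] -= 1' (key present, since getD x 0 > 0) = modify x 0 (· - 1)
def sameElements_alt (a : List Int) (b : List Int) : String :=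
  let cnt := a.foldl (fun d x => d.insert x (d.getD x 0 + 1)) (PySem.Dict.empty : PySem.Dict Int Int)
  let res := b.foldl (fun (p : PySem.Dict Int Int × List Int) x =>
    if p.1.getD x 0 > 0 then (p.1.modify x 0 (· - 1), p.2)
    else (p.1, p.2 ++ [x])) (cnt, ([] : List Int))
  if res.2 = [] then "lists are identical" else "lists are NOT identical"

-- ===== PRECONDITION & SPEC =====
def Spec_sameElements (a : List Int) (b : List Int) (out : String) : Prop := out = sameElements_alt a b
instance (a : List Int) (b : List Int) (out : String) : Decidable (Spec_sameElements a b out) := by unfold Spec_sameElements; infer_instance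

-- ===== CLAIM (what is proved, stated in full; the proofs are below) =====
def Claim_equal_sameElements : Prop := ∀ (a : List Int) (b : List Int), Dom_sameElements a b → Spec_sameElements a b (sameElements a b)

-- ===== LEMMAS AND PROOFS =====

-- Proof-only abbreviations for the two folds (definitionally equal to the ones inside the ports).
def pvFoldA (a b : List Int) : List Int :=
  a.foldl (fun cur x =>
    if x ∈ cur then
      match PySem.List.index? cur x with
      | some i =>
        match PySem.List.pop? cur (i : Int) with
        | some (_, rest) => rest
        | none => cur
      | none => cur
    else cur) b

def pvFoldB (a b : List Int) : PySem.Dict Int Int × List Int :=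
  b.foldl (fun (p : PySem.Dict Int Int × List Int) x =>
    if p.1.getD x 0 > 0 then (p.1.modify x 0 (· - 1), p.2)
    else (p.1, p.2 ++ [x]))
    (a.foldl (fun d x => d.insert x (d.getD x 0 + 1)) (PySem.Dict.empty : PySem.Dict Int Int), ([] : List Int))

theorem sameElements_eq (a b : List Int) :
    sameElements a b = if pvFoldA a b = [] then "lists are identical" else "lists are NOT identical" := rfl

theorem sameElements_alt_eq (a b : List Int) :
    sameElements_alt a b = if (pvFoldB a b).2 = [] then "lists are identical" else "lists are NOT identical" := rfl

-- A's loop body removes the first occurrence of x when x ∈ cur, i.e. it is List.erase.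
theorem stepA_eq_erase (cur : List Int) (x : Int) (hx : x ∈ cur) :
    (match PySem.List.index? cur x with
      | some i =>
        match PySem.List.pop? cur (i : Int) with
        | some (_, rest) => rest
        | none => cur
      | none => cur) = cur.erase x := by
  obtain ⟨k, hk⟩ := Option.isSome_iff_exists.mp ((PySem.List.index?_isSome_iff cur x).mpr hx)
  obtain ⟨pre, suf, hcur, hlen, hnot⟩ := (PySem.List.index?_eq_some_iff cur x k).mp hk
  have hklt : k < cur.length := by subst hcur; simp [← hlen]
  rw [hk]
  simp only [PySem.List.pop?_natCast cur k hklt]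
  subst hcur
  rw [List.eraseIdx_append_of_length_le (by omega), List.erase_append_right _ hnot]
  simp [← hlen]

-- Counts after A's whole loop: truncated difference of the counts.
theorem foldA_count (a : List Int) : ∀ (b : List Int) (v : Int),
    (pvFoldA a b).count v = b.count v - a.count v := by
  induction a with
  | nil => intro b v; simp [pvFoldA]
  | cons x a ih =>
    intro b v
    rw [pvFoldA, List.foldl_cons]
    by_cases hx : x ∈ b
    · rw [if_pos hx, stepA_eq_erase b x hx]
      rw [show ∀ c, (a.foldl _ c) = pvFoldA a c from fun _ => rfl, ih]
      rw [List.count_erase]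
      rcases eq_or_ne x v with h | h
      · subst h
        have : 0 < b.count x := List.count_pos_iff.mpr hx
        simp [List.count_cons_self]; omega
      · simp [h]
    · rw [if_neg hx]
      rw [show ∀ c, (a.foldl _ c) = pvFoldA a c from fun _ => rfl, ih]
      rcases eq_or_ne x v with h | h
      · subst h
        have : b.count x = 0 := List.count_eq_zero.mpr hx
        simp [this]
      · simp [h]

-- Counts of B's kept list, for any starting budget dict whose values are the casts of f.
theorem foldB_count (l : List Int) : ∀ (d : PySem.Dict Int Int) (kept : List Int) (f : Int → Nat),
    (∀ v, d.getD v 0 = (f v : Int)) → ∀ v,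
    (l.foldl (fun (p : PySem.Dict Int Int × List Int) x =>
      if p.1.getD x 0 > 0 then (p.1.modify x 0 (· - 1), p.2)
      else (p.1, p.2 ++ [x])) (d, kept)).2.count v
      = kept.count v + (l.count v - f v) := by
  induction l with
  | nil => intro d kept f hf v; simp
  | cons x l ih =>
    intro d kept f hf v
    rw [List.foldl_cons]
    by_cases hpos : d.getD x 0 > 0
    · rw [if_pos hpos]
      have hf' : ∀ w, (d.modify x 0 (· - 1)).getD w 0 = ((fun w => f w - (if w = x then 1 else 0)) w : Int) := by
        intro w
        rw [PySem.Dict.getD_modify]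
        rcases eq_or_ne w x with h | h
        · have hfx : 0 < f x := by have := hf x; omega
          simp only [h, hf x]
          push_cast; omega
        · simp [h, hf w]
      rw [ih _ _ _ hf']
      rcases eq_or_ne v x with h | h
      · subst h
        have hfx : 0 < f v := by have := hf v; omega
        simp [List.count_cons_self]; omega
      · simp [h, Ne.symm h]
    · rw [if_neg hpos]
      rw [ih _ _ _ hf]
      rcases eq_or_ne v x with h | h
      · subst h
        have hfx : f v = 0 := by have := hf v; omega
        simp [List.count_cons_self, List.count_append, hfx]; omega
      · simp [List.count_append, Ne.symm h]

theorem eq_nil_iff_count (l : List Int) : l = [] ↔ ∀ v, l.count v = 0 := by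
  constructor
  · rintro rfl v; simp
  · intro h
    cases l with
    | nil => rfl
    | cons x l => have := h x; simp [List.count_cons_self] at this

theorem foldB_kept_count (a b : List Int) (v : Int) :
    (pvFoldB a b).2.count v = b.count v - a.count v := by
  have hcnt : ∀ v, (a.foldl (fun d x => d.insert x (d.getD x 0 + 1))
      (PySem.Dict.empty : PySem.Dict Int Int)).getD v 0 = ((a.count v : Nat) : Int) := by
    intro v
    rw [PySem.Dict.getD_foldl_insert_add_one]
    simp
  have := foldB_count b _ [] (fun v => a.count v) hcnt v
  simpa [pvFoldB] using this

-- ===== VERDICT (by name: the statement is the Claim_ definition above) =====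
theorem sameElements_spec : Claim_equal_sameElements := by
  intro a b _
  unfold Spec_sameElements
  rw [sameElements_eq, sameElements_alt_eq]
  have hiff : (pvFoldA a b = []) ↔ ((pvFoldB a b).2 = []) := by
    rw [eq_nil_iff_count, eq_nil_iff_count]
    exact forall_congr' (fun v => by rw [foldA_count a b v, foldB_kept_count a b v])
  exact if_congr hiff rfl rfl
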